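-- pv_equiv track=rewrite | github.com/gunny26/datalogger4 | datalogger/build/lib.linux-i686-2.7/tilak_datalogger/TimeseriesArray.py | filtermatch
-- ===== SOURCE A (Python) =====
-- def filtermatch(key_dict, filterkeys, matchtype):
--     """
--     key_dict is the whole index key, aka
--     {hostname : test, instance:1, other:2}
--
--     filterkey is part
--     {hostname : test}
--     {hostname : test, instance: None, other: None}
--
--     TODO: to be improved
--     """
--     assert matchtype in ("and", "or")
--     matched = 0
--     for key in filterkeys.keys():
--         if filterkeys[key] is None: # ignore keys with value None
--             if matchtype == "and": # and count them as matched
--                 matched += 1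
--             continue
--         if key_dict[key] == filterkeys[key]:
--             matched += 1
--     # every key must match at AND
--     if (matchtype == "and") and (matched == len(filterkeys.keys())):
--         return True
--     # at least one key must match at OR
--     elif (matchtype == "or") and (matched > 0):
--         return True
--     return False
-- ===== SOURCE B (Python) =====
-- def filtermatch(key_dict, filterkeys, matchtype):
--     assert matchtype in ("and", "or")
--     required = {(k, v) for k, v in filterkeys.items() if v is not None}
--     found = {(k, key_dict[k]) for k, v in filterkeys.items() if v is not None}
--     hits = len(required & found)
--     if matchtype == "and":
--         return hits == len(required)
--     return hits > 0
-- ===== Notes on version B (the rewrite author's own statement) =====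
-- stated objective: alternative
-- what changed: Instead of a single loop over filterkeys with a match counter compared against the dict length, B builds two sets of (key, value) pairs - the required non-None filter pairs and the corresponding pairs found in key_dict - and intersects them; 'and' is hits == len(required), 'or' is hits > 0.
import Mathlib
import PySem

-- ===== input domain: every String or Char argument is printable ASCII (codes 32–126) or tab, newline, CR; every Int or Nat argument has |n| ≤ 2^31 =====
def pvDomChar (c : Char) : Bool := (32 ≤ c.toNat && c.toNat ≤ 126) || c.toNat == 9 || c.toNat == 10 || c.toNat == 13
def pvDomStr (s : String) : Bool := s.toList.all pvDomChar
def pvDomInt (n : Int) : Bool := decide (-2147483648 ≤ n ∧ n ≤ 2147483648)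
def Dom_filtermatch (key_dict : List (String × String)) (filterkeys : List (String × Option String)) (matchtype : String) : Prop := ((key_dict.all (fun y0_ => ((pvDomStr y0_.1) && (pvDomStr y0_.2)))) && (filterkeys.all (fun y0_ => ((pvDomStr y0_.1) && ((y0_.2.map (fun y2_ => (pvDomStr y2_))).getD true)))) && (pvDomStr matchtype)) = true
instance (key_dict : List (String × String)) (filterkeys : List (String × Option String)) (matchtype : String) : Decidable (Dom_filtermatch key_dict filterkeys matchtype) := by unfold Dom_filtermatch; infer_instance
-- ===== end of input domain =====

-- B replaces A's lookup loop with a match counter by intersecting two (key, value) pair sets: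
-- the required non-None filter pairs and the pairs found in key_dict (alternative).


-- ===== PORT A =====
-- for key in filterkeys.keys(): dict lookups filterkeys[key] / key_dict[key] are first-match
-- association-list lookups (List.lookup); key_dict[key] missing = KeyError = the 'none' branch,
-- excluded by Pre_.
def filtermatch (key_dict : List (String × String)) (filterkeys : List (String × Option String)) (matchtype : String) : Bool :=
  let matched : Nat := filterkeys.foldl (fun m p =>
    match List.lookup p.1 filterkeys with
    | some none => if matchtype == "and" then m + 1 else m
    | some (some fv) =>
      match List.lookup p.1 key_dict with
      | some kv => if kv == fv then m + 1 else m
      | none => m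
    | none => m) 0
  if matchtype == "and" && matched == filterkeys.length then true
  else if matchtype == "or" && decide (0 < matched) then true
  else false

-- ===== PORT B =====
-- required = {(k, v) for k, v in filterkeys.items() if v is not None}
-- found = {(k, key_dict[k]) for k, v in filterkeys.items() if v is not None}
-- key_dict[k] is a first-match association-list lookup; its KeyError case (lookup = none,
-- where the '.getD \"\"' default would be taken) is excluded by Pre_.
def filtermatch_alt (key_dict : List (String × String)) (filterkeys : List (String × Option String)) (matchtype : String) : Bool :=
  let required : PySem.Set (String × String) :=
    PySem.Set.ofList (filterkeys.filterMap (fun p => p.2.map (fun v => (p.1, v))))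
  let found : PySem.Set (String × String) :=
    PySem.Set.ofList (filterkeys.filterMap (fun p => p.2.map (fun _ => (p.1, (List.lookup p.1 key_dict).getD ""))))
  let hits : Int := PySem.Set.len (PySem.Set.inter required found)
  if matchtype == "and" then hits == PySem.Set.len required else decide (0 < hits)

-- ===== PRECONDITION & SPEC =====
-- Pre_ excludes matchtype outside {"and","or"} (A raises AssertionError), filterkeys with a
-- non-None value whose key is missing from key_dict (A and B raise KeyError), and filterkeys
-- lists with duplicate keys, which do not represent a Python dict.
def Pre_filtermatch (key_dict : List (String × String)) (filterkeys : List (String × Option String)) (matchtype : String) : Prop :=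
  (matchtype = "and" ∨ matchtype = "or") ∧
  (filterkeys.map Prod.fst).Nodup ∧
  ∀ p ∈ filterkeys, p.2 = none ∨ (List.lookup p.1 key_dict).isSome
instance (key_dict : List (String × String)) (filterkeys : List (String × Option String)) (matchtype : String) : Decidable (Pre_filtermatch key_dict filterkeys matchtype) := by unfold Pre_filtermatch; infer_instance

def pvWitness_filtermatch : (List (String × String)) × (List (String × Option String)) × String :=
  ([("host", "test"), ("inst", "1")], [("host", some "test"), ("inst", none)], "and")

def Spec_filtermatch (key_dict : List (String × String)) (filterkeys : List (String × Option String)) (matchtype : String) (out : Bool) : Prop := out = filtermatch_alt key_dict filterkeys matchtype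
instance (key_dict : List (String × String)) (filterkeys : List (String × Option String)) (matchtype : String) (out : Bool) : Decidable (Spec_filtermatch key_dict filterkeys matchtype out) := by unfold Spec_filtermatch; infer_instance

-- ===== CLAIM (what is proved, stated in full; the proofs are below) =====
def Claim_equal_filtermatch : Prop := ∀ (key_dict : List (String × String)) (filterkeys : List (String × Option String)) (matchtype : String), Dom_filtermatch key_dict filterkeys matchtype → Pre_filtermatch key_dict filterkeys matchtype → Spec_filtermatch key_dict filterkeys matchtype (filtermatch key_dict filterkeys matchtype)

-- ===== LEMMAS AND PROOFS =====

-- the common middle form both proofs reduce to: per-pair comparison booleans of the non-None filterkeys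
def pvMs (key_dict : List (String × String)) (filterkeys : List (String × Option String)) : List Bool :=
  filterkeys.filterMap (fun p => p.2.map (fun v => List.lookup p.1 key_dict == some v))

-- under unique keys, looking the key of a member pair up in the list gives that pair's value
theorem pv_lookup_self {β : Type} (fk : List (String × β)) (hnd : (fk.map Prod.fst).Nodup)
    (p : String × β) (hp : p ∈ fk) : List.lookup p.1 fk = some p.2 := by
  induction fk with
  | nil => cases hp
  | cons q t ih =>
    simp only [List.map_cons, List.nodup_cons] at hnd
    rcases List.mem_cons.mp hp with h | h
    · subst h; simp [List.lookup]
    · have hne : (p.1 == q.1) = false := by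
        refine beq_eq_false_iff_ne.mpr (fun he => hnd.1 ?_)
        exact he ▸ List.mem_map.mpr ⟨p, h, rfl⟩
      simp only [List.lookup, hne]
      exact ih hnd.2 h

-- under unique keys, pair membership coincides with lookup
theorem pv_mem_iff_lookup (kd : List (String × String)) (hnd : (kd.map Prod.fst).Nodup)
    (q : String × String) : q ∈ kd ↔ List.lookup q.1 kd = some q.2 := by
  constructor
  · exact fun h => pv_lookup_self kd hnd q h
  · intro h
    rcases q with ⟨k, v⟩
    clear hnd
    induction kd with
    | nil => cases h
    | cons q t ih =>
      rcases q with ⟨a, b⟩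
      by_cases he : (k == a) = true
      · simp [List.lookup, he] at h
        subst h; simp at he; subst he; exact List.mem_cons_self
      · rw [Bool.not_eq_true] at he
        simp only [List.lookup, he] at h
        exact List.mem_cons_of_mem _ (ih h)

-- a counting foldl where the step only looks at the element is countP
theorem pv_foldl_count {α : Type} (pred : α → Bool) (l : List α) (n : Nat) :
    l.foldl (fun m p => if pred p then m + 1 else m) n = n + l.countP pred := by
  induction l generalizing n with
  | nil => simp
  | cons a t ih => by_cases h : pred a = true <;> simp [List.countP_cons, h, ih] <;> omega

theorem pv_foldl_congr {α : Type} (f g : Nat → α → Nat) (l : List α)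
    (h : ∀ p ∈ l, ∀ m, f m p = g m p) (n : Nat) : l.foldl f n = l.foldl g n := by
  induction l generalizing n with
  | nil => rfl
  | cons a t ih =>
    simp only [List.foldl_cons]
    rw [h a (List.mem_cons_self) n]
    exact ih (fun p hp m => h p (List.mem_cons_of_mem _ hp) m) _

theorem pv_beq_succ (a b : Nat) : (a + 1 == b + 1) = (a == b) := by
  cases h : (a == b) with
  | true => simp_all
  | false => simp only [beq_eq_false_iff_ne] at h ⊢; omega

-- all over a boolean list = its true-count reaching the length
theorem pv_all_count (l : List Bool) : l.all id = (l.countP id == l.length) := by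
  induction l with
  | nil => simp
  | cons b t ih =>
    cases b with
    | true => simp [List.countP_cons, pv_beq_succ, ih]
    | false =>
      have hlt : t.countP id < t.length + 1 := Nat.lt_succ_of_le (List.countP_le_length)
      have h2 : (t.countP id == t.length + 1) = false := beq_eq_false_iff_ne.mpr (Nat.ne_of_lt hlt)
      simp [List.countP_cons, h2]

-- any over a boolean list = its true-count being positive
theorem pv_any_count (l : List Bool) : l.any id = decide (0 < l.countP id) := by
  induction l with
  | nil => simp
  | cons b t ih => cases b <;> simp [List.countP_cons, ih]

-- pvMs's all = A's "and"-count reaching the length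
theorem pv_and_count (kd : List (String × String)) (fk : List (String × Option String)) :
    (pvMs kd fk).all id
      = (fk.countP (fun p =>
          match p.2 with
          | none => true
          | some fv => List.lookup p.1 kd == some fv) == fk.length) := by
  induction fk with
  | nil => simp [pvMs]
  | cons p t ih =>
    rcases p with ⟨k, v⟩
    cases v with
    | none => simp [pvMs, List.filterMap_cons, List.countP_cons, pv_beq_succ] at ih ⊢; simpa using ih
    | some fv =>
      by_cases hb : List.lookup k kd = some fv
      · simp [pvMs, List.filterMap_cons, List.countP_cons, hb, pv_beq_succ] at ih ⊢; simpa using ih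
      · have hlt : t.countP (fun p =>
            match p.2 with
            | none => true
            | some fv => List.lookup p.1 kd == some fv) < t.length + 1 :=
          Nat.lt_succ_of_le (List.countP_le_length)
        have h1 : (List.lookup k kd == some fv) = false := beq_eq_false_iff_ne.mpr hb
        have h2 : (t.countP (fun p =>
            match p.2 with
            | none => true
            | some fv => List.lookup p.1 kd == some fv) == t.length + 1) = false :=
          beq_eq_false_iff_ne.mpr (Nat.ne_of_lt hlt)
        simp [pvMs, List.filterMap_cons, List.countP_cons, h1, h2]

-- pvMs's any = A's "or"-count being positive
theorem pv_or_count (kd : List (String × String)) (fk : List (String × Option String)) :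
    (pvMs kd fk).any id
      = decide (0 < fk.countP (fun p =>
          match p.2 with
          | none => false
          | some fv => List.lookup p.1 kd == some fv)) := by
  by_cases h : 0 < fk.countP (fun p =>
      match p.2 with
      | none => false
      | some fv => List.lookup p.1 kd == some fv)
  · rw [decide_eq_true h]
    obtain ⟨q, hq, hfq⟩ := List.countP_pos_iff.mp h
    rcases q with ⟨k, v⟩
    cases v with
    | none => simp at hfq
    | some fv =>
      refine List.any_eq_true.mpr ⟨List.lookup k kd == some fv,
        List.mem_filterMap.mpr ⟨⟨k, some fv⟩, hq, by simp⟩, ?_⟩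
      simpa using hfq
  · rw [decide_eq_false h]
    refine List.any_eq_false.mpr ?_
    rintro b hb hbt
    obtain ⟨⟨k, v⟩, hq, hpb⟩ := List.mem_filterMap.mp hb
    cases v with
    | none => simp at hpb
    | some fv =>
      simp only [Option.map_some, Option.some.injEq] at hpb
      subst hpb
      exact h (List.countP_pos_iff.mpr ⟨⟨k, some fv⟩, hq, by simpa using hbt⟩)

-- A reduces to the all/any of pvMs
theorem pv_A_eq_ms (kd : List (String × String)) (fk : List (String × Option String)) (mt : String)
    (hmt : mt = "and" ∨ mt = "or") (hnd : (fk.map Prod.fst).Nodup) :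
    filtermatch kd fk mt = (if mt == "and" then (pvMs kd fk).all id else (pvMs kd fk).any id) := by
  unfold filtermatch
  rcases hmt with hmt | hmt <;> subst hmt
  · have hc : fk.foldl (fun m p =>
        match List.lookup p.1 fk with
        | some none => if ("and" : String) == "and" then m + 1 else m
        | some (some fv) =>
          match List.lookup p.1 kd with
          | some kv => if kv == fv then m + 1 else m
          | none => m
        | none => m) 0
        = 0 + fk.countP (fun p =>
            match p.2 with
            | none => true
            | some fv => List.lookup p.1 kd == some fv) := by
      rw [pv_foldl_congr _ (fun m p => if (match p.2 with
            | none => true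
            | some fv => List.lookup p.1 kd == some fv) then m + 1 else m) _ ?_]
      · exact pv_foldl_count _ _ _
      · intro p hp m
        rw [pv_lookup_self fk hnd p hp]
        rcases p with ⟨k, v⟩
        cases v with
        | none => simp
        | some fv =>
          cases hkd : List.lookup k kd with
          | none => simp [hkd]
          | some kv => by_cases h : kv = fv <;> simp [hkd, h]
    simp only [hc, Nat.zero_add]
    have e1 : (("and" : String) == "and") = true := by decide
    have e2 : (("and" : String) == "or") = false := by decide
    simp only [e1, e2, Bool.true_and, Bool.false_and, if_true, if_false, Bool.false_eq_true]
    rw [pv_and_count kd fk]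
    cases h : (fk.countP (fun p =>
        match p.2 with
        | none => true
        | some fv => List.lookup p.1 kd == some fv) == fk.length) <;> simp [h]
  · have hc : fk.foldl (fun m p =>
        match List.lookup p.1 fk with
        | some none => if ("or" : String) == "and" then m + 1 else m
        | some (some fv) =>
          match List.lookup p.1 kd with
          | some kv => if kv == fv then m + 1 else m
          | none => m
        | none => m) 0
        = 0 + fk.countP (fun p =>
            match p.2 with
            | none => false
            | some fv => List.lookup p.1 kd == some fv) := by
      rw [pv_foldl_congr _ (fun m p => if (match p.2 with
            | none => false
            | some fv => List.lookup p.1 kd == some fv) then m + 1 else m) _ ?_]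
      · exact pv_foldl_count _ _ _
      · intro p hp m
        rw [pv_lookup_self fk hnd p hp]
        rcases p with ⟨k, v⟩
        cases v with
        | none => simp [show (("or" : String) == "and") = false from by decide]
        | some fv =>
          cases hkd : List.lookup k kd with
          | none => simp [hkd]
          | some kv => by_cases h : kv = fv <;> simp [hkd, h]
    simp only [hc, Nat.zero_add]
    have e1 : (("or" : String) == "and") = false := by decide
    have e2 : (("or" : String) == "or") = true := by decide
    simp only [e1, e2, Bool.true_and, Bool.false_and, if_true, if_false, Bool.false_eq_true]
    rw [pv_or_count kd fk]
    cases h : decide (0 < fk.countP (fun p =>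
        match p.2 with
        | none => false
        | some fv => List.lookup p.1 kd == some fv)) <;> simp [h]

-- the keys of a per-pair filterMap over the non-None filterkeys form a sublist of filterkeys' keys
theorem pv_req_keys_sublist (f : (String × Option String) → String → String) (fk : List (String × Option String)) :
    ((fk.filterMap (fun p => p.2.map (fun v => (p.1, f p v)))).map Prod.fst).Sublist (fk.map Prod.fst) := by
  induction fk with
  | nil => simp
  | cons p t ih =>
    rcases p with ⟨k, v⟩
    cases v with
    | none => simpa [List.filterMap_cons] using ih.cons k
    | some fv => simpa [List.filterMap_cons] using ih.cons₂ k

-- pvMs is the per-pair comparison map over the required-pairs list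
theorem pv_ms_eq_map (kd : List (String × String)) (fk : List (String × Option String)) :
    pvMs kd fk = (fk.filterMap (fun p => p.2.map (fun v => (p.1, v)))).map
      (fun q => List.lookup q.1 kd == some q.2) := by
  unfold pvMs
  induction fk with
  | nil => simp
  | cons p t ih =>
    rcases p with ⟨k, v⟩
    cases v with
    | none => simpa [List.filterMap_cons] using ih
    | some fv => simpa [List.filterMap_cons] using ih

-- B reduces to the all/any of pvMs
theorem pv_B_eq_ms (kd : List (String × String)) (fk : List (String × Option String)) (mt : String)
    (hndf : (fk.map Prod.fst).Nodup)
    (hall : ∀ p ∈ fk, p.2 = none ∨ (List.lookup p.1 kd).isSome) :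
    filtermatch_alt kd fk mt = (if mt == "and" then (pvMs kd fk).all id else (pvMs kd fk).any id) := by
  unfold filtermatch_alt
  set reqList := fk.filterMap (fun p => p.2.map (fun v => (p.1, v))) with hreq
  set probeList := fk.filterMap (fun p => p.2.map (fun _ => (p.1, (List.lookup p.1 kd).getD ""))) with hprobe
  have hreqnd : reqList.Nodup :=
    ((pv_req_keys_sublist (fun _ v => v) fk).nodup hndf).of_map Prod.fst
  have hndp : (probeList.map Prod.fst).Nodup :=
    (pv_req_keys_sublist (fun p _ => (List.lookup p.1 kd).getD "") fk).nodup hndf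
  have hself : PySem.Set.ofList reqList = reqList := PySem.Set.ofList_eq_self_of_nodup _ hreqnd
  have hms : pvMs kd fk = reqList.map (fun q => List.lookup q.1 kd == some q.2) :=
    hreq ▸ pv_ms_eq_map kd fk
  have hinter : PySem.Set.inter (PySem.Set.ofList reqList) (PySem.Set.ofList probeList)
      = reqList.filter (fun q => (PySem.Set.ofList probeList).contains q) := by
    rw [hself]; rfl
  have hcnt : (reqList.filter (fun q => (PySem.Set.ofList probeList).contains q)).length
      = (pvMs kd fk).countP id := by
    rw [show ∀ (l : List (String × String)) (P : (String × String) → Bool),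
        (l.filter P).length = l.countP P from fun l P => (List.countP_eq_length_filter ..).symm]
    rw [hms, List.countP_map]
    refine List.countP_congr ?_
    intro q hq
    obtain ⟨p, hpfk, hpm⟩ := List.mem_filterMap.mp hq
    rcases p with ⟨k, vo⟩
    cases vo with
    | none => cases hpm
    | some v =>
      simp only [Option.map_some, Option.some.injEq] at hpm
      rcases hall ⟨k, some v⟩ hpfk with h | h
      · cases h
      · obtain ⟨kv, hkv⟩ := Option.isSome_iff_exists.mp h
        have hpmem : (k, kv) ∈ probeList := by
          rw [hprobe]
          exact List.mem_filterMap.mpr ⟨⟨k, some v⟩, hpfk, by simp [hkv]⟩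
        have hlp : List.lookup k probeList = some kv := pv_lookup_self probeList hndp (k, kv) hpmem
        have hb : ((PySem.Set.ofList probeList).contains q) = (List.lookup q.1 kd == some q.2) := by
          subst hpm
          have hmemiff : ((k, v) ∈ probeList) ↔ kv = v := by
            rw [pv_mem_iff_lookup probeList hndp ⟨k, v⟩]
            show List.lookup k probeList = some v ↔ kv = v
            rw [hlp]
            exact ⟨fun hx => Option.some.inj hx, fun hx => hx ▸ rfl⟩
          show ((PySem.Set.ofList probeList).contains (k, v)) = (List.lookup k kd == some v)
          rw [hkv]
          by_cases he : kv = v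
          · subst he
            simp [PySem.Set.mem_ofList, hmemiff.mpr rfl]
          · have h1 : ((k, v) ∈ probeList) = False := by simp [hmemiff, he]
            have h2 : ((some kv : Option String) == some v) = false :=
              beq_eq_false_iff_ne.mpr (by simpa using he)
            simp [PySem.Set.mem_ofList, hmemiff, he, h2]
        simp only [Function.comp, id_eq, hb]
  by_cases hm : mt == "and"
  · simp only [hm, if_true]
    show ((PySem.Set.len (PySem.Set.inter (PySem.Set.ofList reqList) (PySem.Set.ofList probeList)) : Int)
        == PySem.Set.len (PySem.Set.ofList reqList)) = (pvMs kd fk).all id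
    rw [hinter, hself]
    show (((reqList.filter _).length : Int) == (reqList.length : Int)) = _
    rw [pv_all_count]
    have hlen : (pvMs kd fk).length = reqList.length := by rw [hms, List.length_map]
    rw [hlen] at *
    cases hc : ((pvMs kd fk).countP id == reqList.length)
    · have := beq_eq_false_iff_ne.mp hc
      rw [hcnt] at *
      exact beq_eq_false_iff_ne.mpr (by exact_mod_cast this)
    · have := beq_iff_eq.mp hc
      rw [hcnt] at *
      exact beq_iff_eq.mpr (by exact_mod_cast this)
  · simp only [hm, if_false]
    show (decide ((0:Int) < PySem.Set.len (PySem.Set.inter (PySem.Set.ofList reqList) (PySem.Set.ofList probeList)))) = (pvMs kd fk).any id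
    rw [hinter]
    show (decide ((0:Int) < ((reqList.filter _).length : Int))) = _
    rw [pv_any_count, hcnt]
    by_cases h : 0 < (pvMs kd fk).countP id
    · rw [decide_eq_true h, decide_eq_true (by exact_mod_cast h)]
    · rw [decide_eq_false h, decide_eq_false (by exact_mod_cast h)]


-- ===== VERDICT (by name: the statements are the Claim_ definitions above) =====
theorem filtermatch_spec : Claim_equal_filtermatch := by
  intro kd fk mt _ hpre
  obtain ⟨hmt, hndf, hall⟩ := hpre
  unfold Spec_filtermatch
  rw [pv_A_eq_ms kd fk mt hmt hndf, pv_B_eq_ms kd fk mt hndf hall]
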